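-- pv_equiv track=rewrite | github.com/MechanicalMax/AdventOfCode2023 | AoC23d19.py | getParts
-- ===== SOURCE A (Python) =====
-- def getParts(lines):
--     parts = []
--     startIndex = lines.index("\n")
--     for line in lines[startIndex+1:]:
--         line = line.strip("}{\n")
--         nums = []
--         inNum = False
--         for char in line:
--             if char.isnumeric():
--                 if inNum:
--                     nums[-1] += char
--                 else:
--                     inNum = True
--                     nums.append(char)
--             else:
--                 inNum = False
--         parts.append(tuple(map(int, nums)))
--     return parts
-- ===== SOURCE B (Python) =====
-- def _nums(line):
--     out, i, n = [], 0, len(line)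
--     while i < n:
--         if line[i].isnumeric():
--             j = i
--             while j < n and line[j].isnumeric():
--                 j += 1
--             out.append(int(line[i:j]))
--             i = j
--         else:
--             i += 1
--     return out
--
-- def getParts(lines):
--     start = lines.index("\n")
--     return [tuple(_nums(line.strip("}{\n"))) for line in lines[start + 1:]]
-- ===== Notes on version B (the rewrite author's own statement) =====
-- stated objective: simpler
-- what changed: Replaced A's per-character inNum flag state-machine (which grows the last string in place) with a run-based two-pointer scanner that takes each maximal digit run in one step and converts it directly, and the outer append loop with a comprehension.
import Mathlib
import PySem

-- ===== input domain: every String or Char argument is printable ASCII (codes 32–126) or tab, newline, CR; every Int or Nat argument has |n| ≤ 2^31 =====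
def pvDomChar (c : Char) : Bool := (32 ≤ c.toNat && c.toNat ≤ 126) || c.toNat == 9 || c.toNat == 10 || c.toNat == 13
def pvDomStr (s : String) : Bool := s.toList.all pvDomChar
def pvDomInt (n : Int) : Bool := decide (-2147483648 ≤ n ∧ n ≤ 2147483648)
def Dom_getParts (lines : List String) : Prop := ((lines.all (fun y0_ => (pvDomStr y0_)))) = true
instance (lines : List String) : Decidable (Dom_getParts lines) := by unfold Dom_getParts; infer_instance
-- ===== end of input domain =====

-- B replaces A's inNum flag state-machine with a run-based scanner (take/drop a whole
-- maximal digit run at a time); objective: simpler. Python isnumeric = isdigit on the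
-- ASCII domain Dom_getParts, so both ports use PySem.Chars.isdigit.

-- ===== PORT A =====
-- inner loop of A: state (nums, inNum); 'nums[-1] += char' replaces the last element
def getPartsStep (st : List (List Char) × Bool) (c : Char) : List (List Char) × Bool :=
  if PySem.Chars.isdigit c then
    if st.2 then (st.1.dropLast ++ [st.1.getLastD [] ++ [c]], true)
    else (st.1 ++ [[c]], true)
  else (st.1, false)

def getParts (lines : List String) : List (List Int) :=
  match PySem.List.index? lines "\n" with
  | none => []   -- Python raises ValueError here; excluded by Pre_getParts
  | some startIndex =>
    (PySem.List.slice lines (some ((startIndex : Int) + 1)) none).foldl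
      (fun parts line =>
        let l := PySem.Chars.stripChars line.toList ['}', '{', '\n']
        let nums := (l.foldl getPartsStep ([], false)).1
        -- int(s): nums holds nonempty digit runs, so ofChars? is always some; getD 0 unreachable
        parts ++ [nums.map (fun s => (PySem.Int.ofChars? s).getD 0)]) []

-- ===== PORT B =====
-- Source B's _nums: consume a whole maximal digit run at a time (the two-pointer scan)
def digitRuns : List Char → List (List Char)
  | [] => []
  | c :: cs =>
    if PySem.Chars.isdigit c then
      (c :: cs.takeWhile PySem.Chars.isdigit) :: digitRuns (cs.dropWhile PySem.Chars.isdigit)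
    else digitRuns cs
termination_by cs => cs.length
decreasing_by
  · exact Nat.lt_succ_of_le (List.length_dropWhile_le _ _)
  · simp

def getParts_alt (lines : List String) : List (List Int) :=
  match PySem.List.index? lines "\n" with
  | none => []   -- Python raises ValueError here; excluded by Pre_getParts
  | some start =>
    (PySem.List.slice lines (some ((start : Int) + 1)) none).map
      (fun line =>
        (digitRuns (PySem.Chars.stripChars line.toList ['}', '{', '\n'])).map
          (fun g => (PySem.Int.ofChars? g).getD 0))

-- ===== PRECONDITION & SPEC =====
-- lines.index("\n") raises ValueError when "\n" is absent; that is all Pre_ excludes.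
def Pre_getParts (lines : List String) : Prop := "\n" ∈ lines
instance (lines : List String) : Decidable (Pre_getParts lines) := by unfold Pre_getParts; infer_instance
def pvWitness_getParts : List String := ["x=1\n", "\n", "{m=12,a=3}\n"]

def Spec_getParts (lines : List String) (out : List (List Int)) : Prop := out = getParts_alt lines
instance (lines : List String) (out : List (List Int)) : Decidable (Spec_getParts lines out) := by unfold Spec_getParts; infer_instance

-- ===== CLAIM (what is proved, stated in full; the proofs are below) =====
def Claim_equal_getParts : Prop := ∀ (lines : List String), Dom_getParts lines → Pre_getParts lines → Spec_getParts lines (getParts lines)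

-- ===== LEMMAS AND PROOFS =====

-- A's flag fold, characterised by digit runs.  Two statements, one induction:
-- from the inNum=false state the fold appends exactly the digit runs of the rest;
-- from the inNum=true state (last element s open) the leading run merges into s.
theorem foldl_getPartsStep (cs : List Char) :
    (∀ nums, (cs.foldl getPartsStep (nums, false)).1 = nums ++ digitRuns cs) ∧
    (∀ (nums : List (List Char)) (s : List Char),
      (cs.foldl getPartsStep (nums ++ [s], true)).1 =
        nums ++ [s ++ cs.takeWhile PySem.Chars.isdigit] ++
          digitRuns (cs.dropWhile PySem.Chars.isdigit)) := by
  induction cs with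
  | nil => simp [digitRuns]
  | cons c cs ih =>
    by_cases h : PySem.Chars.isdigit c = true
    · constructor
      · intro nums
        simp only [List.foldl_cons, getPartsStep, h, if_true, if_neg Bool.false_ne_true]
        rw [ih.2 nums [c]]
        simp [digitRuns, h]
      · intro nums s
        simp only [List.foldl_cons, getPartsStep, h, if_true]
        simp only [List.dropLast_concat, List.getLastD_concat]
        rw [ih.2 nums (s ++ [c])]
        simp [h]
    · constructor
      · intro nums
        simp only [List.foldl_cons, getPartsStep, h, Bool.false_eq_true, if_false]
        rw [(ih.1) nums]
        simp [digitRuns, h]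
      · intro nums s
        simp only [List.foldl_cons, getPartsStep, h, Bool.false_eq_true, if_false]
        rw [(ih.1) (nums ++ [s])]
        simp [h, digitRuns]

theorem inner_eq (l : List Char) :
    (l.foldl getPartsStep ([], false)).1 = digitRuns l := by
  simpa using (foldl_getPartsStep l).1 []

-- ===== VERDICT (by name: the statement is the Claim_ definition above) =====
theorem getParts_spec : Claim_equal_getParts := by
  intro lines _ _
  unfold Spec_getParts getParts getParts_alt
  cases PySem.List.index? lines "\n" with
  | none => rfl
  | some i =>
    dsimp only
    rw [PySem.List.foldl_append_singleton_eq_map]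
    simp [inner_eq]
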